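-- pv_equiv track=rewrite | github.com/PrashanthBhaskara/KalshiCorrelationForecast | market_data/scraper.py | get_actual_event_status
-- ===== SOURCE A (Python) =====
-- def get_actual_event_status(event: dict) -> str:
--     """
--     Determine actual event status from its markets' statuses.
--     Don't trust the query parameter - check the actual market data.
--     """
--     markets = event.get("markets", [])
--
--     if not markets:
--         return "unknown"
--
--     market_statuses = [m.get("status", "").lower() for m in markets]
--
--     # If all markets are settled/finalized, event is settled
--     settled_statuses = {"settled", "finalized", "determined"}
--     if all(s in settled_statuses for s in market_statuses):
--         return "settled"
--
--     # If any market is active, event is open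
--     if any(s == "active" for s in market_statuses):
--         return "open"
--
--     # If any market is closed (but not settled), event is closed
--     if any(s == "closed" for s in market_statuses):
--         return "closed"
--
--     # Default fallback
--     return "unknown"
-- ===== SOURCE B (Python) =====
-- def get_actual_event_status(event: dict) -> str:
--     markets = event.get("markets", [])
--     if not markets:
--         return "unknown"
--     rank = 0
--     for m in markets:
--         s = m.get("status", "").lower()
--         if s == "active":
--             r = 3
--         elif s == "closed":
--             r = 2
--         elif s in ("settled", "finalized", "determined"):
--             r = 0
--         else:
--             r = 1
--         if r > rank:
--             rank = r
--     return ["settled", "unknown", "closed", "open"][rank]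
-- ===== Notes on version B (the rewrite author's own statement) =====
-- stated objective: alternative
-- what changed: Replaces the three ordered full scans (all/any/any) by one fold computing the maximum of a per-market numeric priority (active=3, closed=2, other=1, settled-family=0), then decodes the max by table indexing.
import Mathlib
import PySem

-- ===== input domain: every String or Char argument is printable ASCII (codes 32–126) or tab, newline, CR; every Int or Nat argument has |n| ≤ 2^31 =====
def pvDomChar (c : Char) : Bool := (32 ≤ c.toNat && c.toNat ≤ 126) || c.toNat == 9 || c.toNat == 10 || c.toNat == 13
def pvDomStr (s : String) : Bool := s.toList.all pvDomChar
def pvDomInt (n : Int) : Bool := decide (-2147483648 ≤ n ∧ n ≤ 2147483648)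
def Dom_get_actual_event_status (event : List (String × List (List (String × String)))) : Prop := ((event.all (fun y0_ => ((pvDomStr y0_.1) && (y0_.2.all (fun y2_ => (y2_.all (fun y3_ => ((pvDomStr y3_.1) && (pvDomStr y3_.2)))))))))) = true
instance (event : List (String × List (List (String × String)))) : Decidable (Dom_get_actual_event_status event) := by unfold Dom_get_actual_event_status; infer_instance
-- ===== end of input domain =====

-- B replaces A's three ordered full scans (all/any/any) by one fold computing the maximum of a
-- per-market numeric priority (active=3, closed=2, other=1, settled-family=0), decoded by table indexing.


-- ===== PORT A =====
def get_actual_event_status (event : List (String × List (List (String × String)))) : String :=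
  let markets := PySem.Dict.getD (PySem.Dict.mk event) "markets" []
  if markets = [] then "unknown"
  else
    let market_statuses := markets.map (fun m => PySem.Str.lower (PySem.Dict.getD (PySem.Dict.mk m) "status" ""))
    if market_statuses.all (fun s => PySem.Set.contains (PySem.Set.ofList ["settled", "finalized", "determined"]) s) then "settled"
    else if market_statuses.any (fun s => s == "active") then "open"
    else if market_statuses.any (fun s => s == "closed") then "closed"
    else "unknown"

-- ===== PORT B =====
-- the if/elif chain computing the per-market priority, factored as a helper
def pvRank (s : String) : Nat :=
  if s == "active" then 3
  else if s == "closed" then 2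
  else if ["settled", "finalized", "determined"].contains s then 0
  else 1

def get_actual_event_status_alt (event : List (String × List (List (String × String)))) : String :=
  let markets := PySem.Dict.getD (PySem.Dict.mk event) "markets" []
  if markets = [] then "unknown"
  else
    let rank := markets.foldl (fun rank m =>
      let s := PySem.Str.lower (PySem.Dict.getD (PySem.Dict.mk m) "status" "")
      let r := pvRank s
      if r > rank then r else rank) 0
    -- rank is provably ≤ 3, so the Python list indexing never raises; getD's default is unreachable
    ["settled", "unknown", "closed", "open"].getD rank "unknown"

-- ===== PRECONDITION & SPEC =====
def Spec_get_actual_event_status (event : List (String × List (List (String × String)))) (out : String) : Prop := out = get_actual_event_status_alt event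
instance (event : List (String × List (List (String × String)))) (out : String) : Decidable (Spec_get_actual_event_status event out) := by unfold Spec_get_actual_event_status; infer_instance

-- ===== CLAIM (what is proved, stated in full; the proofs are below) =====
def Claim_equal_get_actual_event_status : Prop := ∀ (event : List (String × List (List (String × String)))), Dom_get_actual_event_status event → Spec_get_actual_event_status event (get_actual_event_status event)

-- ===== LEMMAS AND PROOFS =====

theorem pvRank_le_three (s : String) : pvRank s ≤ 3 := by
  unfold pvRank; split_ifs <;> omega

theorem pvRank_eq_zero_iff (s : String) :
    pvRank s = 0 ↔ ["settled", "finalized", "determined"].contains s = true := by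
  unfold pvRank
  split_ifs with h1 h2 h3 <;> simp_all

theorem three_le_pvRank_iff (s : String) : 3 ≤ pvRank s ↔ s = "active" := by
  unfold pvRank; split_ifs with h1 h2 h3 <;> simp_all

theorem two_le_pvRank_iff (s : String) : 2 ≤ pvRank s ↔ s = "active" ∨ s = "closed" := by
  unfold pvRank; split_ifs with h1 h2 h3 <;> simp_all

-- generalized-accumulator characterization of B's max fold
theorem foldl_rank_le_iff (L : List String) (a k : Nat) :
    k ≤ L.foldl (fun b s => if pvRank s > b then pvRank s else b) a ↔
      k ≤ a ∨ ∃ s ∈ L, k ≤ pvRank s := by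
  induction L generalizing a with
  | nil => simp
  | cons x L ih =>
    simp only [List.foldl_cons, ih, List.mem_cons]
    constructor
    · rintro (h | ⟨s, hs, hr⟩)
      · by_cases hx : pvRank x > a
        · simp only [if_pos hx] at h; exact Or.inr ⟨x, Or.inl rfl, h⟩
        · simp only [if_neg hx] at h; exact Or.inl h
      · exact Or.inr ⟨s, Or.inr hs, hr⟩
    · rintro (h | ⟨s, hs | hs, hr⟩)
      · left; split <;> omega
      · left; subst hs; split <;> omega
      · exact Or.inr ⟨s, hs, hr⟩

theorem foldl_rank_le_three (L : List String) :
    L.foldl (fun b s => if pvRank s > b then pvRank s else b) 0 ≤ 3 := by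
  have h4 : ¬ (4 ≤ L.foldl (fun b s => if pvRank s > b then pvRank s else b) 0) := by
    rw [foldl_rank_le_iff]
    rintro (h | ⟨s, _, hr⟩)
    · omega
    · have := pvRank_le_three s; omega
  omega

theorem contains_settled_set (s : String) :
    PySem.Set.contains (PySem.Set.ofList ["settled", "finalized", "determined"]) s
      = ["settled", "finalized", "determined"].contains s := by
  rw [Bool.eq_iff_iff]
  simp [PySem.Set.contains, PySem.Set.mem_ofList, List.contains_eq_mem]

-- ===== VERDICT (by name: the statement is the Claim_ definition above) =====
theorem get_actual_event_status_spec : Claim_equal_get_actual_event_status := by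
  intro event _
  unfold Spec_get_actual_event_status get_actual_event_status get_actual_event_status_alt
  by_cases h0 : PySem.Dict.getD (PySem.Dict.mk event) "markets" [] = []
  · simp [h0]
  · simp only [h0, if_false]
    set M := PySem.Dict.getD (PySem.Dict.mk event) "markets" [] with hM
    set f : List (String × String) → String := fun m => PySem.Str.lower (PySem.Dict.getD (PySem.Dict.mk m) "status" "") with hf
    have hfold : (M.foldl (fun rank m => if pvRank (f m) > rank then pvRank (f m) else rank) 0)
        = ((M.map f).foldl (fun b s => if pvRank s > b then pvRank s else b) 0) := by
      rw [List.foldl_map]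
    set L := M.map f with hLdef
    rw [hfold]
    set R := L.foldl (fun b s => if pvRank s > b then pvRank s else b) 0 with hR
    by_cases hall : L.all (fun s => PySem.Set.contains (PySem.Set.ofList ["settled", "finalized", "determined"]) s)
    · -- all settled: R = 0
      have hR0 : R = 0 := by
        have : ¬ (1 ≤ R) := by
          rw [hR, foldl_rank_le_iff]
          rintro (h | ⟨s, hs, hr⟩)
          · omega
          · have := (List.all_eq_true.mp hall) s hs
            rw [contains_settled_set] at this
            have := (pvRank_eq_zero_iff s).mpr this
            omega
        omega
      rw [if_pos hall, hR0]; rfl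
    · by_cases hact : L.any (fun s => s == "active")
      · -- some active: R = 3
        obtain ⟨s, hs, he⟩ := List.any_eq_true.mp hact
        have h3 : 3 ≤ R := by
          rw [hR, foldl_rank_le_iff]
          exact Or.inr ⟨s, hs, (three_le_pvRank_iff s).mpr (by simpa using he)⟩
        have hle := foldl_rank_le_three L
        rw [← hR] at hle
        have hR3 : R = 3 := by omega
        rw [if_neg hall, if_pos hact, hR3]; rfl
      · by_cases hcl : L.any (fun s => s == "closed")
        · -- some closed, none active: R = 2
          obtain ⟨s, hs, he⟩ := List.any_eq_true.mp hcl
          have h2 : 2 ≤ R := by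
            rw [hR, foldl_rank_le_iff]
            exact Or.inr ⟨s, hs, (two_le_pvRank_iff s).mpr (Or.inr (by simpa using he))⟩
          have hn3 : ¬ (3 ≤ R) := by
            rw [hR, foldl_rank_le_iff]
            rintro (h | ⟨t, ht, hr⟩)
            · omega
            · have : t = "active" := (three_le_pvRank_iff t).mp hr
              subst this
              have : ¬ (L.any (fun s => s == "active") = true) := hact
              simp only [List.any_eq_true, beq_iff_eq] at this
              exact this ⟨"active", ht, rfl⟩
          have hR2 : R = 2 := by omega
          rw [if_neg hall, if_neg hact, if_pos hcl, hR2]; rfl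
        · -- none of the above: R = 1
          have h1 : 1 ≤ R := by
            obtain ⟨s, hs, hns⟩ : ∃ s ∈ L, ¬ (PySem.Set.contains (PySem.Set.ofList ["settled", "finalized", "determined"]) s = true) := by
              by_contra hc
              push Not at hc
              exact hall (List.all_eq_true.mpr (by intro s hs; exact (hc s hs)))
            rw [contains_settled_set] at hns
            have : pvRank s ≠ 0 := fun h => hns ((pvRank_eq_zero_iff s).mp h)
            rw [hR, foldl_rank_le_iff]
            exact Or.inr ⟨s, hs, by omega⟩
          have hn2 : ¬ (2 ≤ R) := by
            rw [hR, foldl_rank_le_iff]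
            rintro (h | ⟨t, ht, hr⟩)
            · omega
            · rcases (two_le_pvRank_iff t).mp hr with h | h <;> subst h
              · have : ¬ (L.any (fun s => s == "active") = true) := hact
                simp only [List.any_eq_true, beq_iff_eq] at this
                exact this ⟨"active", ht, rfl⟩
              · have : ¬ (L.any (fun s => s == "closed") = true) := hcl
                simp only [List.any_eq_true, beq_iff_eq] at this
                exact this ⟨"closed", ht, rfl⟩
          have hR1 : R = 1 := by omega
          rw [if_neg hall, if_neg hact, if_neg hcl, hR1]; rfl
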